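-- pv_equiv track=rewrite | github.com/RelatifVision/Auto_Wcm_Ai_App_Def | ui/auto_text_window.py | _format_days_spanish
-- ===== SOURCE A (Python) =====
-- def _format_days_spanish(days_list, month_name):
--     """
--     Convierte una lista de días [1, 2, 3, 5, 7, 8, 9] en texto legible:
--     "1 al 3, 5 y del 7 al 9 de enero"
--     """
--     if not days_list:
--         return "[días]"
--
--     # Ordenar y eliminar duplicados
--     days = sorted(set(days_list))
--     ranges = []
--     start = days[0]
--     end = days[0]
--
--     for day in days[1:]:
--         if day == end + 1:
--             end = day
--         else:
--             if start == end:
--                 ranges.append(str(start))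
--             else:
--                 ranges.append(f"{start} al {end}")
--             start = day
--             end = day
--
--     # Añadir último rango
--     if start == end:
--         ranges.append(str(start))
--     else:
--         ranges.append(f"{start} al {end}")
--
--     # Formatear según número de rangos
--     if len(ranges) == 1:
--         result = ranges[0]
--     elif len(ranges) == 2:
--         result = f"{ranges[0]} y {ranges[1]}"
--     else:
--         result = ", ".join(ranges[:-1]) + f" y {ranges[-1]}"
--
--     return f"{result} de {month_name.lower()}"
-- ===== SOURCE B (Python) =====
-- def _format_days_spanish(days_list, month_name):
--     if not days_list:
--         return "[días]"
--
--     # Run boundaries via set membership: d starts a run iff d-1 is absent,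
--     # d ends a run iff d+1 is absent; the k-th start pairs with the k-th end.
--     s = set(days_list)
--     starts = sorted(d for d in s if d - 1 not in s)
--     ends = sorted(d for d in s if d + 1 not in s)
--     ranges = [str(a) if a == b else f"{a} al {b}" for a, b in zip(starts, ends)]
--
--     if len(ranges) == 1:
--         result = ranges[0]
--     elif len(ranges) == 2:
--         result = f"{ranges[0]} y {ranges[1]}"
--     else:
--         result = ", ".join(ranges[:-1]) + f" y {ranges[-1]}"
--
--     return f"{result} de {month_name.lower()}"
-- ===== Notes on version B (the rewrite author's own statement) =====
-- stated objective: alternative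
-- what changed: Replaces A's single sorted-scan with incremental start/end run tracking by boundary detection on the set itself: a day starts a run iff day-1 is not in the set and ends one iff day+1 is not, the two boundary lists are sorted independently and zipped into ranges.
import Mathlib
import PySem

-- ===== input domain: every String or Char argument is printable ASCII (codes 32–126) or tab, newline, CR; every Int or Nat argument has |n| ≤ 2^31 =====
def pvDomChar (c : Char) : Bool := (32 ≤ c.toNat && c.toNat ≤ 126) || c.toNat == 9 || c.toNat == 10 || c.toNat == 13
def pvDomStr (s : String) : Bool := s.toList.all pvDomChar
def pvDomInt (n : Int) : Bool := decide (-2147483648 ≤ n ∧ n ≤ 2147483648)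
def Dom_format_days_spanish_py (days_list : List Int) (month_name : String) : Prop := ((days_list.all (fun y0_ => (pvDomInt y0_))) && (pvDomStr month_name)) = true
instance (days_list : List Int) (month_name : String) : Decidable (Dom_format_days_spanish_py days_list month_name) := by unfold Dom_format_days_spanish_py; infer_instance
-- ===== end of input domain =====

-- B detects run boundaries by set membership (d starts a run iff d-1 ∉ set, ends one iff
-- d+1 ∉ set) and zips the two sorted boundary lists, instead of A's incremental
-- start/end tracking over the sorted list; same cost.

-- ===== PORT A =====
-- the 'if start == end: str(start) else f"{start} al {end}"' lines A writes twice
def pvFmtRange (s e : Int) : String :=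
  if s = e then PySem.Int.toStr s else PySem.Int.toStr s ++ " al " ++ PySem.Int.toStr e

-- A's 'for day in days[1:]' loop carrying (start, end, ranges)
def pvLoopA : List Int → Int → Int → List String → Int × Int × List String
  | [], s, e, acc => (s, e, acc)
  | d :: rest, s, e, acc =>
    if d = e + 1 then pvLoopA rest s d acc
    else pvLoopA rest d d (acc ++ [pvFmtRange s e])

-- the final 'len(ranges) == 1 / == 2 / else'-join plus ' de {month_name.lower()}' suffix:
-- these source lines are IDENTICAL in A and in Source B, so both ports share this helper
-- (ranges[:-1] = dropLast, ranges[0]/ranges[-1] on the nonempty ranges list)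
def pvJoinRanges (ranges : List String) (month_name : String) : String :=
  (if ranges.length = 1 then ranges.headD ""
   else if ranges.length = 2 then ranges.headD "" ++ " y " ++ ranges.getLastD ""
   else PySem.Str.join ", " ranges.dropLast ++ " y " ++ ranges.getLastD "")
  ++ " de " ++ PySem.Str.lower month_name

def format_days_spanish_py (days_list : List Int) (month_name : String) : String :=
  if days_list = [] then "[días]"
  else
    match PySem.List.sorted (PySem.Set.ofList days_list) (fun x => x) false with
    | [] => "[días]"  -- unreachable: sorted(set(xs)) of a nonempty xs is nonempty
    | d0 :: rest =>
      let t := pvLoopA rest d0 d0 []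
      let ranges := t.2.2 ++ [pvFmtRange t.1 t.2.1]   -- 'Añadir último rango'
      pvJoinRanges ranges month_name

-- ===== PORT B =====
-- 'str(a) if a == b else f"{a} al {b}"' applied to one (start, end) pair of the zip
def pvFmtPair (p : Int × Int) : String :=
  if p.1 = p.2 then PySem.Int.toStr p.1
  else PySem.Int.toStr p.1 ++ " al " ++ PySem.Int.toStr p.2

def format_days_spanish_py_alt (days_list : List Int) (month_name : String) : String :=
  if days_list = [] then "[días]"
  else
    let s := PySem.Set.ofList days_list
    -- 'sorted(d for d in s if d - 1 not in s)': sorted with no key over the set, exact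
    let starts := PySem.List.sorted (s.filter (fun d => !(PySem.Set.contains s (d - 1)))) (fun x => x) false
    let ends := PySem.List.sorted (s.filter (fun d => !(PySem.Set.contains s (d + 1)))) (fun x => x) false
    let ranges := (starts.zip ends).map pvFmtPair
    pvJoinRanges ranges month_name

-- ===== PRECONDITION & SPEC =====
def Spec_format_days_spanish_py (days_list : List Int) (month_name : String) (out : String) : Prop := out = format_days_spanish_py_alt days_list month_name
instance (days_list : List Int) (month_name : String) (out : String) : Decidable (Spec_format_days_spanish_py days_list month_name out) := by unfold Spec_format_days_spanish_py; infer_instance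

-- ===== CLAIM (what is proved, stated in full; the proofs are below) =====
def Claim_equal_format_days_spanish_py : Prop := ∀ (days_list : List Int) (month_name : String), Dom_format_days_spanish_py days_list month_name → Spec_format_days_spanish_py days_list month_name (format_days_spanish_py days_list month_name)

-- ===== LEMMAS AND PROOFS =====

-- the runs of a day list, as (start, end) pairs, seen from a current run [s..e]
def pvRuns : Int → Int → List Int → List (Int × Int)
  | s, e, [] => [(s, e)]
  | s, e, d :: l => if d = e + 1 then pvRuns s d l else (s, e) :: pvRuns d d l

-- run starts strictly after a current run ending at e
def pvSt : Int → List Int → List Int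
  | _, [] => []
  | e, b :: t => if b = e + 1 then pvSt b t else b :: pvSt b t

-- run ends, the current run ending at e so far
def pvEn : Int → List Int → List Int
  | e, [] => [e]
  | e, b :: t => if b = e + 1 then pvEn b t else e :: pvEn b t

-- A's loop, flushed, is pvRuns rendered with pvFmtRange
theorem pvLoopA_runs (l : List Int) : ∀ (s e : Int) (acc : List String),
    (pvLoopA l s e acc).2.2 ++ [pvFmtRange (pvLoopA l s e acc).1 (pvLoopA l s e acc).2.1]
      = acc ++ (pvRuns s e l).map (fun p => pvFmtRange p.1 p.2) := by
  induction l with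
  | nil => intro s e acc; simp [pvLoopA, pvRuns]
  | cons d l ih =>
    intro s e acc
    by_cases h : d = e + 1
    · simp [pvLoopA, pvRuns, h, ih]
    · simp [pvLoopA, pvRuns, h, ih]

-- zipping the start/end boundary lists reproduces the runs
theorem pvZip_runs (l : List Int) : ∀ (s e : Int),
    List.zip (s :: pvSt e l) (pvEn e l) = pvRuns s e l := by
  induction l with
  | nil => intro s e; simp [pvSt, pvEn, pvRuns, List.zip]
  | cons b t ih =>
    intro s e
    simp only [pvSt, pvEn, pvRuns]
    by_cases h : b = e + 1
    · simp only [if_pos h]; exact ih s b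
    · simp only [if_neg h]
      rw [List.zip_cons_cons, ih b b]

-- membership tests on the strictly increasing full list, localized:
-- in pre ++ b :: t with everything increasing and e the largest element of pre,
-- b-1 is present iff b = e + 1
theorem pvMem_pred (pre t : List Int) (b e : Int)
    (hp : (pre ++ b :: t).Pairwise (· < ·)) (he : e ∈ pre) (hmax : ∀ x ∈ pre, x ≤ e) :
    ((b - 1) ∈ (pre ++ b :: t)) ↔ b = e + 1 := by
  have hlt : ∀ x ∈ pre, ∀ y ∈ b :: t, x < y := by
    intro x hx y hy
    exact (List.pairwise_append.mp hp).2.2 x hx y hy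
  have heb : e < b := hlt e he b List.mem_cons_self
  have htb : ∀ y ∈ t, b < y := by
    intro y hy
    exact (List.rel_of_pairwise_cons ((List.pairwise_append.mp hp).2.1)) hy
  constructor
  · intro hmem
    rcases List.mem_append.mp hmem with h1 | h2
    · have h3 := hmax _ h1
      have h4 := hlt _ h1 b List.mem_cons_self
      -- b - 1 ≤ e and e < b force b - 1 = e
      omega
    · rcases List.mem_cons.mp h2 with h3 | h4
      · omega
      · have := htb _ h4; omega
  · intro hbe
    have : b - 1 = e := by omega
    exact List.mem_append.mpr (Or.inl (this ▸ he))

-- symmetric test for successors: d+1 with d the head of the suffix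
theorem pvMem_succ (pre t : List Int) (d : Int)
    (hp : (pre ++ d :: t).Pairwise (· < ·)) :
    ((d + 1) ∈ (pre ++ d :: t)) ↔ (∃ b l, t = b :: l ∧ b = d + 1) := by
  have hlt : ∀ x ∈ pre, x < d :=
    fun x hx => (List.pairwise_append.mp hp).2.2 x hx d List.mem_cons_self
  have htd : t.Pairwise (· < ·) := ((List.pairwise_append.mp hp).2.1).tail
  have hdt : ∀ y ∈ t, d < y :=
    fun y hy => (List.rel_of_pairwise_cons ((List.pairwise_append.mp hp).2.1)) hy
  constructor
  · intro hmem
    rcases List.mem_append.mp hmem with h1 | h2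
    · have := hlt _ h1; omega
    · rcases List.mem_cons.mp h2 with h3 | h4
      · omega
      · match t, h4 with
        | b :: l, h4 =>
          rcases List.mem_cons.mp h4 with h5 | h6
          · exact ⟨b, l, rfl, h5.symm⟩
          · have h7 := hdt b List.mem_cons_self
            have h8 := (List.rel_of_pairwise_cons htd) h6
            omega
  · rintro ⟨b, l, rfl, hb⟩
    exact List.mem_append.mpr (Or.inr (List.mem_cons.mpr (Or.inr (hb ▸ List.mem_cons_self))))

-- the starts filter over the suffix, with e the largest already-seen element
theorem pvFilter_st (l : List Int) : ∀ (pre : List Int) (e : Int),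
    (pre ++ l).Pairwise (· < ·) → e ∈ pre → (∀ x ∈ pre, x ≤ e) →
    l.filter (fun d => !(decide ((d - 1) ∈ (pre ++ l)))) = pvSt e l := by
  induction l with
  | nil => intro pre e _ _ _; simp [pvSt]
  | cons b t ih =>
    intro pre e hp he hmax
    have hmem := pvMem_pred pre t b e hp he hmax
    have hassoc : pre ++ b :: t = (pre ++ [b]) ++ t := by simp
    have hp' : ((pre ++ [b]) ++ t).Pairwise (· < ·) := by rw [← hassoc]; exact hp
    have hlt : ∀ x ∈ pre, x < b :=
      fun x hx => (List.pairwise_append.mp hp).2.2 x hx b List.mem_cons_self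
    have hrec := ih (pre ++ [b]) b hp' (by simp) (by
      intro x hx
      rcases List.mem_append.mp hx with h1 | h2
      · exact le_of_lt (hlt _ h1)
      · simp at h2; omega)
    by_cases h : b = e + 1
    · have hc : (!(decide ((b - 1) ∈ (pre ++ b :: t)))) = false := by
        simp [hmem.mpr h]
      rw [List.filter_cons_of_neg (by simpa using hc)]
      simp only [pvSt, if_pos h]
      rw [show pre ++ b :: t = (pre ++ [b]) ++ t by simp]
      exact hrec
    · have hc : (!(decide ((b - 1) ∈ (pre ++ b :: t)))) = true := by
        simp only [Bool.not_eq_eq_eq_not, Bool.not_true, decide_eq_false_iff_not]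
        intro hcm; exact h (hmem.mp hcm)
      rw [List.filter_cons_of_pos (by simpa using hc)]
      simp only [pvSt, if_neg h]
      congr 1
      rw [show pre ++ b :: t = (pre ++ [b]) ++ t by simp]
      exact hrec

-- the pvEn list, head-normalized: pvEn e l with e prepended as an element
def pvEnL : List Int → List Int
  | [] => []
  | e :: l => pvEn e l

theorem pvEnL_cons (e : Int) (l : List Int) : pvEnL (e :: l) = pvEn e l := rfl

-- the ends filter over the suffix
theorem pvFilter_en (l : List Int) : ∀ (pre : List Int),
    (pre ++ l).Pairwise (· < ·) →
    l.filter (fun d => !(decide ((d + 1) ∈ (pre ++ l)))) = pvEnL l := by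
  induction l with
  | nil => intro pre _; simp [pvEnL]
  | cons d t ih =>
    intro pre hp
    have hmem := pvMem_succ pre t d hp
    have hassoc : pre ++ d :: t = (pre ++ [d]) ++ t := by simp
    have hp' : ((pre ++ [d]) ++ t).Pairwise (· < ·) := by rw [← hassoc]; exact hp
    have hrec := ih (pre ++ [d]) hp'
    match t with
    | [] =>
      have hc : (!(decide ((d + 1) ∈ (pre ++ d :: [])))) = true := by
        simp only [Bool.not_eq_eq_eq_not, Bool.not_true, decide_eq_false_iff_not]
        intro hcm
        rcases hmem.mp hcm with ⟨b, l, hbl, _⟩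
        exact absurd hbl (by simp)
      rw [List.filter_cons_of_pos (by simpa using hc)]
      simp [pvEnL, pvEn]
    | b :: t' =>
      by_cases h : b = d + 1
      · have hc : (!(decide ((d + 1) ∈ (pre ++ d :: b :: t')))) = false := by
          simp [hmem.mpr ⟨b, t', rfl, h⟩]
        rw [List.filter_cons_of_neg (by simpa using hc)]
        simp only [pvEnL, pvEn, if_pos h]
        rw [show pre ++ d :: b :: t' = (pre ++ [d]) ++ b :: t' by simp]
        rw [hrec, pvEnL_cons]
      · have hc : (!(decide ((d + 1) ∈ (pre ++ d :: b :: t')))) = true := by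
          simp only [Bool.not_eq_eq_eq_not, Bool.not_true, decide_eq_false_iff_not]
          intro hcm
          rcases hmem.mp hcm with ⟨b', l', hbl, hb'⟩
          cases hbl; exact h hb'
        rw [List.filter_cons_of_pos (by simpa using hc)]
        simp only [pvEnL, pvEn, if_neg h]
        congr 1
        rw [show pre ++ d :: b :: t' = (pre ++ [d]) ++ b :: t' by simp]
        rw [hrec, pvEnL_cons]

-- sorted(set(xs)) of a nonempty xs is nonempty
theorem pvSortedSet_ne_nil (xs : List Int) (h : xs ≠ []) :
    PySem.List.sorted (PySem.Set.ofList xs) (fun x => x) false ≠ [] := by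
  rw [Ne, PySem.List.sorted_eq_nil_iff]
  intro hnil
  match xs, h with
  | x :: t, _ =>
    have : x ∈ PySem.Set.ofList (x :: t) := by
      rw [PySem.Set.mem_ofList]; exact List.mem_cons_self
    rw [hnil] at this
    exact absurd this (List.not_mem_nil)

-- sorting a filtered set equals filtering the sorted set (distinct elements, strict order)
theorem pvSorted_filter (xs : List Int) (p : Int → Bool) :
    PySem.List.sorted ((PySem.Set.ofList xs).filter p) (fun x => x) false
      = (PySem.List.sorted (PySem.Set.ofList xs) (fun x => x) false).filter p := by
  apply PySem.List.sorted_eq_of_perm_of_pairwise_lt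
  · exact ((PySem.List.sorted_perm _ _ _).filter p)
  · exact List.Pairwise.sublist List.filter_sublist (PySem.List.sorted_ofList_pairwise_lt xs)

-- ===== VERDICT (by name: the statement is the Claim_ definition above) =====
theorem format_days_spanish_py_spec : Claim_equal_format_days_spanish_py := by
  intro days_list month_name _
  unfold Spec_format_days_spanish_py format_days_spanish_py format_days_spanish_py_alt
  by_cases hnil : days_list = []
  · simp [hnil]
  · rw [if_neg hnil, if_neg hnil]
    have hpw := PySem.List.sorted_ofList_pairwise_lt days_list
    have hmemeq : ∀ y : Int,
        (y ∈ PySem.Set.ofList days_list)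
          ↔ y ∈ PySem.List.sorted (PySem.Set.ofList days_list) (fun x => x) false := by
      intro y; rw [PySem.List.mem_sorted]
    match hdays : PySem.List.sorted (PySem.Set.ofList days_list) (fun x => x) false with
    | [] => exact absurd hdays (pvSortedSet_ne_nil days_list hnil)
    | d0 :: rest =>
      rw [hdays] at hpw hmemeq
      simp only []
      congr 1
      -- A's ranges
      rw [pvLoopA_runs rest d0 d0 [], List.nil_append]
      -- B's boundary lists, as filters of the sorted list
      have hfe : ∀ q : Int → Int,
          (PySem.Set.ofList days_list).filter (fun d => !(PySem.Set.contains (PySem.Set.ofList days_list) (q d)))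
            = (PySem.Set.ofList days_list).filter (fun d => !(decide ((q d) ∈ (d0 :: rest)))) := by
        intro q
        apply List.filter_congr
        intro x _
        congr 1
        simp only [PySem.Set.contains]
        rw [List.contains_eq_mem, decide_eq_decide]
        exact hmemeq (q x)
      rw [hfe (fun d => d - 1), hfe (fun d => d + 1), pvSorted_filter, pvSorted_filter, hdays]
      -- localize the two filters
      have hst : (d0 :: rest).filter (fun d => !(decide ((d - 1) ∈ (d0 :: rest)))) = d0 :: pvSt d0 rest := by
        have hd0 : (!(decide ((d0 - 1) ∈ (d0 :: rest)))) = true := by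
          simp only [Bool.not_eq_eq_eq_not, Bool.not_true, decide_eq_false_iff_not]
          intro hc
          rcases List.mem_cons.mp hc with h1 | h2
          · omega
          · have := (List.rel_of_pairwise_cons hpw) h2; omega
        rw [List.filter_cons_of_pos (by simpa using hd0)]
        congr 1
        have h2 := pvFilter_st rest [d0] d0 (by simpa using hpw) (by simp) (by simp)
        simpa using h2
      have hen : (d0 :: rest).filter (fun d => !(decide ((d + 1) ∈ (d0 :: rest)))) = pvEn d0 rest := by
        have := pvFilter_en (d0 :: rest) [] (by simpa using hpw)
        simpa [pvEnL_cons] using this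
      rw [hst, hen, pvZip_runs]
      -- pvFmtPair is pvFmtRange on the pair components
      rfl
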